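-- pv_equiv track=rewrite | github.com/fabriziosalmi/nexus-mcp-server | tools/security_tools.py | _has_common_patterns
-- ===== SOURCE A (Python) =====
-- def _has_common_patterns(password: str) -> bool:
--     """Verifica se la password contiene pattern comuni."""
--     # Pattern sequenziali
--     sequential_patterns = [
--         "123", "234", "345", "456", "567", "678", "789", "890",
--         "abc", "bcd", "cde", "def", "efg", "fgh", "ghi", "hij",
--         "qwe", "wer", "ert", "rty", "tyu", "yui", "uio", "iop",
--         "asd", "sdf", "dfg", "fgh", "ghj", "hjk", "jkl",
--         "zxc", "xcv", "cvb", "vbn", "bnm"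
--     ]
--
--     password_lower = password.lower()
--
--     # Verifica sequenze
--     for pattern in sequential_patterns:
--         if pattern in password_lower:
--             return True
--
--     # Verifica ripetizioni
--     for i in range(len(password) - 2):
--         if password[i] == password[i+1] == password[i+2]:
--             return True
--
--     # Verifica pattern comuni
--     common_patterns = ["password", "admin", "user", "test", "demo", "guest"]
--     for pattern in common_patterns:
--         if pattern in password_lower:
--             return True
--
--     return False
-- ===== SOURCE B (Python) =====
-- _BASES = ("1234567890", "abcdefghij", "qwertyuiop", "asdfghjkl", "zxcvbnm")
-- _WORDS = "password admin user test demo guest".split()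
--
--
-- def _has_common_patterns(password: str) -> bool:
--     """Derives the 36 sequential patterns as windows of 5 base rows instead of
--     enumerating them, and detects triple repetition by zipping the password
--     with its own shifts."""
--     if any(a == b == c for a, b, c in zip(password, password[1:], password[2:])):
--         return True
--     low = password.lower()
--     for i in range(len(low) - 2):
--         if any(low[i:i + 3] in base for base in _BASES):
--             return True
--     return any(word in low for word in _WORDS)
-- ===== Notes on version B (the rewrite author's own statement) =====
-- stated objective: alternative
-- what changed: A enumerates 41 literal patterns and scans the password once per pattern plus an index loop for repetitions; B derives the 36 sequential patterns as length-3 windows of 5 base rows (digits, alphabet, keyboard rows) and slides over the password testing each window for containment in a base row, and detects triple repetition by zipping the password with its own two shifts instead of indexing.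
import Mathlib
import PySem

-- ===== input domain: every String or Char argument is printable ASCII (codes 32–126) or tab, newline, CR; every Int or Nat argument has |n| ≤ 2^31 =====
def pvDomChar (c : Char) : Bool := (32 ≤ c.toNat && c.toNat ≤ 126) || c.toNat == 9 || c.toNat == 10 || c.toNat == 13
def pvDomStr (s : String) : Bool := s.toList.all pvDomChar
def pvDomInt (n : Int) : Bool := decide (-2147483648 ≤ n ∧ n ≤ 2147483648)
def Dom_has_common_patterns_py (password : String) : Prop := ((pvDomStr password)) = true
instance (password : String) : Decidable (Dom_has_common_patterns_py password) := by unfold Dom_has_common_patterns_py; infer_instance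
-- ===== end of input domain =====

-- B derives the 36 sequential patterns as windows of 5 base rows and zips the password with its
-- shifts for the repetition test, instead of A's per-pattern scans and index loop (objective:
-- alternative; not measured faster).

-- ===== PORT A =====
-- A's literal pattern tables ("fgh" appears twice, as in A); strings become char lists via .toList
def pvSeqPats : List (List Char) :=
  ["123".toList, "234".toList, "345".toList, "456".toList, "567".toList, "678".toList,
   "789".toList, "890".toList,
   "abc".toList, "bcd".toList, "cde".toList, "def".toList, "efg".toList, "fgh".toList,
   "ghi".toList, "hij".toList,
   "qwe".toList, "wer".toList, "ert".toList, "rty".toList, "tyu".toList, "yui".toList,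
   "uio".toList, "iop".toList,
   "asd".toList, "sdf".toList, "dfg".toList, "fgh".toList, "ghj".toList, "hjk".toList,
   "jkl".toList,
   "zxc".toList, "xcv".toList, "cvb".toList, "vbn".toList, "bnm".toList]

def pvCommonPats : List (List Char) :=
  ["password".toList, "admin".toList, "user".toList, "test".toList, "demo".toList, "guest".toList]

-- Port of A: scan each sequential pattern, then the repetition index loop, then each common pattern.
def has_common_patterns_py (password : String) : Bool :=
  let password_lower := PySem.Chars.lower password.toList
  if pvSeqPats.any (fun pattern => PySem.Chars.isIn pattern password_lower) then true
  else if (PySem.List.pyRange 0 (PySem.Str.len password - 2) 1).any (fun i =>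
      (PySem.List.pyGet? password.toList i == PySem.List.pyGet? password.toList (i+1)) &&
      (PySem.List.pyGet? password.toList (i+1) == PySem.List.pyGet? password.toList (i+2))) then true
  else pvCommonPats.any (fun pattern => PySem.Chars.isIn pattern password_lower)

-- ===== PORT B =====
-- B's base rows: every length-3 window of a row is one of A's sequential patterns
def pvBases : List (List Char) :=
  [['1','2','3','4','5','6','7','8','9','0'],
   ['a','b','c','d','e','f','g','h','i','j'],
   ['q','w','e','r','t','y','u','i','o','p'],
   ['a','s','d','f','g','h','j','k','l'],
   ['z','x','c','v','b','n','m']]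

def pvWords : List (List Char) :=
  PySem.Chars.split₀ "password admin user test demo guest".toList

-- Port of B: zip-of-shifts repetition test, then slide a window over positions testing containment
-- in a base row, then the word scan.
def has_common_patterns_py_alt (password : String) : Bool :=
  let s := password.toList
  if (s.zip ((PySem.List.slice s (some 1) none).zip (PySem.List.slice s (some 2) none))).any
      (fun t => t.1 == t.2.1 && t.2.1 == t.2.2) then true
  else
    let low := PySem.Chars.lower s
    if (PySem.List.pyRange 0 ((PySem.Chars.len low : Int) - 2) 1).any (fun i =>
        pvBases.any (fun base =>
          PySem.Chars.isIn (PySem.List.slice low (some i) (some (i + 3))) base)) then true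
    else pvWords.any (fun word => PySem.Chars.isIn word low)

-- ===== PRECONDITION & SPEC =====
def Spec_has_common_patterns_py (password : String) (out : Bool) : Prop := out = has_common_patterns_py_alt password
instance (password : String) (out : Bool) : Decidable (Spec_has_common_patterns_py password out) := by unfold Spec_has_common_patterns_py; infer_instance

-- ===== CLAIM (what is proved, stated in full; the proofs are below) =====
def Claim_equal_has_common_patterns_py : Prop := ∀ (password : String), Dom_has_common_patterns_py password → Spec_has_common_patterns_py password (has_common_patterns_py password)

-- ===== LEMMAS AND PROOFS =====

lemma seqPats_len : ∀ p ∈ pvSeqPats, p.length = 3 := by decide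

-- every length-3 sublist of a base row is one of A's sequential patterns
lemma window_of_base (w : List Char) (hw : w.length = 3) (b : List Char) (hb : b ∈ pvBases)
    (h : PySem.Chars.isIn w b = true) : w ∈ pvSeqPats := by
  rw [PySem.Chars.isIn_iff_infix] at h
  obtain ⟨pre, suf, hps⟩ := h
  have hwin : w = (b.drop pre.length).take 3 := by
    rw [← hps, List.append_assoc, List.drop_left' rfl,
      List.take_append_of_le_length (by omega), List.take_of_length_le (by omega)]
  have hlen : pre.length + 3 + suf.length = b.length := by
    rw [← hps]; simp; omega
  fin_cases hb <;>
    · simp only [List.length_cons, List.length_nil] at hlen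
      set j := pre.length with hj
      have hub : j ≤ 7 := by omega
      interval_cases j <;> first
        | (rw [hwin]; decide)
        | (exfalso; omega)

-- each sequential pattern occurs in some base row
lemma pat_in_some_base : ∀ p ∈ pvSeqPats, pvBases.any (fun b => PySem.Chars.isIn p b) = true := by
  decide

-- A's pattern scan over patterns ↔ a window form
lemma seqA_iff (l : List Char) :
    (pvSeqPats.any (fun p => PySem.Chars.isIn p l) = true) ↔
    (∃ j, j + 3 ≤ l.length ∧ (l.drop j).take 3 ∈ pvSeqPats) := by
  rw [List.any_eq_true]
  constructor
  · rintro ⟨p, hp, hin⟩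
    rw [← PySem.Chars.exists_prefix_drop_iff_isIn] at hin
    obtain ⟨j, hpre⟩ := hin
    have hplen := seqPats_len p hp
    have hle : p.length ≤ (l.drop j).length := hpre.length_le
    simp only [List.length_drop] at hle
    refine ⟨j, by omega, ?_⟩
    rw [List.prefix_iff_eq_take, hplen] at hpre
    rw [← hpre]; exact hp
  · rintro ⟨j, hj, hmem⟩
    refine ⟨_, hmem, ?_⟩
    rw [← PySem.Chars.exists_prefix_drop_iff_isIn]
    refine ⟨j, ?_⟩
    rw [List.prefix_iff_eq_take, seqPats_len _ hmem]

-- B's window scan over positions ↔ the same window form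
lemma seqB_iff (l : List Char) :
    ((PySem.List.pyRange 0 ((l.length : Int) - 2) 1).any (fun i =>
        pvBases.any (fun base =>
          PySem.Chars.isIn (PySem.List.slice l (some i) (some (i + 3))) base)) = true) ↔
    (∃ j, j + 3 ≤ l.length ∧ (l.drop j).take 3 ∈ pvSeqPats) := by
  rw [List.any_eq_true]
  constructor
  · rintro ⟨x, hx, hcond⟩
    rw [PySem.List.mem_pyRange_one] at hx
    obtain ⟨h0, h2⟩ := hx
    lift x to Nat using h0 with j
    rw [List.any_eq_true] at hcond
    obtain ⟨b, hb, hin⟩ := hcond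
    rw [show (j : Int) + 3 = ((j + 3 : Nat) : Int) by push_cast; ring,
      PySem.List.slice_natCast] at hin
    have hwlen : ((l.drop j).take (j + 3 - j)).length = 3 := by
      simp only [List.length_take, List.length_drop]; omega
    refine ⟨j, by omega, ?_⟩
    have := window_of_base _ hwlen b hb hin
    simpa using this
  · rintro ⟨j, hj, hmem⟩
    refine ⟨(j : Int), ?_, ?_⟩
    · rw [PySem.List.mem_pyRange_one]; constructor <;> omega
    · rw [show (j : Int) + 3 = ((j + 3 : Nat) : Int) by push_cast; ring,
        PySem.List.slice_natCast, show j + 3 - j = 3 by omega]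
      exact pat_in_some_base _ hmem

-- the common repetition form: three equal consecutive optional lookups
def pvRep (s : List Char) : Prop :=
  ∃ k, k + 2 < s.length ∧ s[k]? = s[k+1]? ∧ s[k+1]? = s[k+2]?

-- A's index loop ↔ pvRep
lemma repA_iff (s : List Char) :
    ((PySem.List.pyRange 0 ((s.length : Int) - 2) 1).any (fun i =>
      (PySem.List.pyGet? s i == PySem.List.pyGet? s (i+1)) &&
      (PySem.List.pyGet? s (i+1) == PySem.List.pyGet? s (i+2))) = true) ↔ pvRep s := by
  rw [List.any_eq_true]
  constructor
  · rintro ⟨x, hx, hcond⟩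
    rw [PySem.List.mem_pyRange_one] at hx
    obtain ⟨h0, h2⟩ := hx
    lift x to Nat using h0 with k
    rw [show (k : Int) + 1 = ((k + 1 : Nat) : Int) by push_cast; ring,
      show (k : Int) + 2 = ((k + 2 : Nat) : Int) by push_cast; ring,
      PySem.List.pyGet?_natCast, PySem.List.pyGet?_natCast, PySem.List.pyGet?_natCast,
      Bool.and_eq_true, beq_iff_eq, beq_iff_eq] at hcond
    exact ⟨k, by omega, hcond.1, hcond.2⟩
  · rintro ⟨k, hk, h1, h2⟩
    refine ⟨(k : Int), ?_, ?_⟩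
    · rw [PySem.List.mem_pyRange_one]; constructor <;> omega
    · rw [show (k : Int) + 1 = ((k + 1 : Nat) : Int) by push_cast; ring,
        show (k : Int) + 2 = ((k + 2 : Nat) : Int) by push_cast; ring,
        PySem.List.pyGet?_natCast, PySem.List.pyGet?_natCast, PySem.List.pyGet?_natCast,
        Bool.and_eq_true, beq_iff_eq, beq_iff_eq]
      exact ⟨h1, h2⟩

-- B's zip of shifts ↔ pvRep
lemma repB_iff (s : List Char) :
    ((s.zip ((PySem.List.slice s (some 1) none).zip (PySem.List.slice s (some 2) none))).any
      (fun t => t.1 == t.2.1 && t.2.1 == t.2.2) = true) ↔ pvRep s := by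
  have e1 : PySem.List.slice s (some 1) none = s.drop 1 := by simp [pysem]
  have e2 : PySem.List.slice s (some 2) none = s.drop 2 := by simp [pysem]
  rw [e1, e2, List.any_eq_true]
  constructor
  · rintro ⟨t, ht, hcond⟩
    rw [List.mem_iff_getElem] at ht
    obtain ⟨k, hk, hget⟩ := ht
    simp only [List.length_zip, List.length_drop] at hk
    have hk2 : k + 2 < s.length := by omega
    rw [List.getElem_zip, List.getElem_zip, List.getElem_drop, List.getElem_drop] at hget
    rw [← hget, Bool.and_eq_true, beq_iff_eq, beq_iff_eq] at hcond
    refine ⟨k, hk2, ?_, ?_⟩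
    · rw [List.getElem?_eq_getElem (by omega), List.getElem?_eq_getElem (by omega)]
      simpa [Nat.add_comm] using congrArg some hcond.1
    · rw [List.getElem?_eq_getElem (by omega), List.getElem?_eq_getElem (by omega)]
      simpa [Nat.add_comm] using congrArg some hcond.2
  · rintro ⟨k, hk, h1', h2'⟩
    rw [List.getElem?_eq_getElem (by omega), List.getElem?_eq_getElem (by omega),
      Option.some_inj] at h1' h2'
    refine ⟨(s.zip ((s.drop 1).zip (s.drop 2)))[k]'(by
      simp only [List.length_zip, List.length_drop]; omega), List.getElem_mem _, ?_⟩
    rw [List.getElem_zip, List.getElem_zip, List.getElem_drop, List.getElem_drop,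
      Bool.and_eq_true, beq_iff_eq, beq_iff_eq]
    refine ⟨?_, ?_⟩
    · simpa [Nat.add_comm] using h1'
    · simpa [Nat.add_comm] using h2'

lemma main_iff (password : String) :
    has_common_patterns_py password = true ↔ has_common_patterns_py_alt password = true := by
  have hwords : pvWords = pvCommonPats := by decide
  have hlenstr : PySem.Str.len password = (password.toList.length : Int) := by simp
  have hlenlow : (PySem.Chars.len (PySem.Chars.lower password.toList) : Int) =
      ((PySem.Chars.lower password.toList).length : Int) := by simp
  simp only [has_common_patterns_py, has_common_patterns_py_alt, hlenstr, hlenlow, hwords]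
  constructor
  · intro h
    split_ifs at h with hs hr
    · -- A's seq scan fired
      rw [seqA_iff] at hs
      split_ifs with hbr hbs
      · rfl
      · rfl
      · exfalso; apply hbs
        rw [seqB_iff]; exact hs
    · -- A's rep loop fired
      rw [repA_iff] at hr
      split_ifs with hbr hbs
      · rfl
      · rfl
      · exfalso; apply hbr; rw [repB_iff]; exact hr
    · -- A's word scan fired
      split_ifs with hbr hbs
      · rfl
      · rfl
      · exact h
  · intro h
    split_ifs at h with hbr hbs
    · -- B's rep fired
      rw [repB_iff] at hbr
      split_ifs with hs hr
      · rfl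
      · rfl
      · exfalso; apply hr; rw [repA_iff]; exact hbr
    · -- B's window scan fired
      rw [seqB_iff] at hbs
      split_ifs with hs hr
      · rfl
      · rfl
      · exfalso; apply hs; rw [seqA_iff]; exact hbs
    · -- B's word scan fired
      split_ifs with hs hr
      · rfl
      · rfl
      · exact h

-- ===== VERDICT (by name: the statement is the Claim_ definition above) =====
theorem has_common_patterns_py_spec : Claim_equal_has_common_patterns_py := by
  intro password _
  unfold Spec_has_common_patterns_py
  rw [Bool.eq_iff_iff]
  exact main_iff password
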